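-- pv_equiv track=rewrite | github.com/jimitchavdadev/College | Sem 5/Info Security/5x5 playfair cipher/playfair_cipher.py | format_plaintext
-- ===== SOURCE A (Python) =====
-- def format_plaintext(plaintext):
--     # converting all plaintext to uppercase and removing J with I and remove space in the string
--     plaintext = plaintext.upper().replace("J", "I").replace(" ", "")
--     formatted_text = ""
--
--     i = 0
--     while i < len(plaintext):
--         formatted_text += plaintext[i]
--         # if two consecutive letters are same it will replace the next one with 'X'
--         if i + 1 < len(plaintext) and plaintext[i] == plaintext[i + 1]:
--             formatted_text += "X"
--         elif i + 1 < len(plaintext):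
--             formatted_text += plaintext[i + 1]
--             i += 1
--         i += 1
--
--         # if formatted string is in odd length we have to change it to even length
--         # we need even length string to make diagraphs
--     if len(formatted_text) % 2 != 0:
--         formatted_text += "X"
--     return formatted_text
-- ===== SOURCE B (Python) =====
-- def format_plaintext(plaintext):
--     s = plaintext.upper().replace("J", "I").replace(" ", "")
--     # Stage 1: run-length encode the cleaned text.
--     runs = []
--     for ch in s:
--         if runs and runs[-1][0] == ch:
--             runs[-1][1] += 1
--         else:
--             runs.append([ch, 1])
--     # Stage 2: expand each run; a run of k equal letters yields k-1 letter+filler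
--     # digraphs, with its last letter carried over to pair with the next run.
--     parts = []
--     carry = None
--     for ch, k in runs:
--         if carry is not None:
--             parts.append(carry + ch)
--             k -= 1
--             carry = None
--         if k > 0:
--             parts.append((ch + "X") * (k - 1))
--             carry = ch
--     if carry is not None:
--         parts.append(carry)
--     text = "".join(parts)
--     if len(text) % 2 != 0:
--         text += "X"
--     return text
-- ===== Notes on version B (the rewrite author's own statement) =====
-- stated objective: faster
-- what changed: Replaces A's character-by-character lookahead loop with quadratic string concatenation by a two-stage algorithm: first run-length encode the cleaned text, then expand each run of k equal letters into k-1 letter-plus-filler digraphs with the run's last letter carried over to pair with the next run.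
import Mathlib
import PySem

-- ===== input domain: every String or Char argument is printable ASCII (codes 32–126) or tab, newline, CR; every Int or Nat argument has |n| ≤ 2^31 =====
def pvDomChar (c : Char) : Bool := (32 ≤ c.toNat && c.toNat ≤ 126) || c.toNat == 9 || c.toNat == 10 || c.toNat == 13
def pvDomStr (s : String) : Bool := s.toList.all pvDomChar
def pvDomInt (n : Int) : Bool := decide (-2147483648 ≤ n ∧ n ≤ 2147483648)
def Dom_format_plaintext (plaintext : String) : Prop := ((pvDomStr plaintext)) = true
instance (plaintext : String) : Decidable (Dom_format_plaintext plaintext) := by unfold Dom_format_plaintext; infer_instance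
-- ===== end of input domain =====

-- B replaces A's character-by-character lookahead loop (quadratic string concatenation)
-- by a two-stage algorithm: run-length encode the cleaned text, then expand each run of k
-- equal letters into k-1 letter-plus-filler digraphs plus a carried letter; same value.

-- ===== PORT A =====
-- the while loop of A: at each step it looks at the current character and (when present) the next one
def pvLoopA : List Char → List Char → List Char
  | acc, [] => acc
  | acc, [c] => acc ++ [c]
  | acc, c :: d :: rest =>
      if c = d then pvLoopA (acc ++ [c, 'X']) (d :: rest)
      else pvLoopA (acc ++ [c, d]) rest

def format_plaintext (plaintext : String) : String :=
  let t := PySem.Str.replace (PySem.Str.replace (PySem.Str.upper plaintext) "J" "I") " " ""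
  let out := pvLoopA [] t.toList
  let out := if out.length % 2 ≠ 0 then out ++ ['X'] else out
  String.ofList out

-- ===== PORT B =====
-- Stage 1 of B: the run-length-encoding loop (current run char + count, flushed when the char changes)
def pvRunsGo (c : Char) (k : Nat) : List Char → List (Char × Nat)
  | [] => [(c, k)]
  | d :: rest => if d = c then pvRunsGo c (k + 1) rest else (c, k) :: pvRunsGo d 1 rest

def pvRuns : List Char → List (Char × Nat)
  | [] => []
  | c :: rest => pvRunsGo c 1 rest

-- Stage 2 of B: the expansion loop over runs, carrying an unpaired letter between runs
def pvExpand (carry : Option Char) : List (Char × Nat) → List Char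
  | [] => match carry with
          | none => []
          | some q => [q]
  | (c, k) :: rest =>
      match carry with
      | some q =>
          if k - 1 > 0 then
            [q, c] ++ (List.replicate (k - 1 - 1) [c, 'X']).flatten ++ pvExpand (some c) rest
          else
            [q, c] ++ pvExpand none rest
      | none =>
          if k > 0 then
            (List.replicate (k - 1) [c, 'X']).flatten ++ pvExpand (some c) rest
          else
            pvExpand none rest

def format_plaintext_alt (plaintext : String) : String :=
  let t := PySem.Str.replace (PySem.Str.replace (PySem.Str.upper plaintext) "J" "I") " " ""
  let out := pvExpand none (pvRuns t.toList)
  let out := if out.length % 2 ≠ 0 then out ++ ['X'] else out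
  String.ofList out

-- ===== PRECONDITION & SPEC =====
def Spec_format_plaintext (plaintext : String) (out : String) : Prop := out = format_plaintext_alt plaintext
instance (plaintext : String) (out : String) : Decidable (Spec_format_plaintext plaintext out) := by unfold Spec_format_plaintext; infer_instance

-- ===== CLAIM (what is proved, stated in full; the proofs are below) =====
def Claim_equal_format_plaintext : Prop := ∀ (plaintext : String), Dom_format_plaintext plaintext → Spec_format_plaintext plaintext (format_plaintext plaintext)

-- ===== LEMMAS AND PROOFS =====

-- growing a run's count by one prepends one letter-plus-filler digraph to its no-carry expansion
lemma pvExpand_none_succ : ∀ (cs : List Char) (d : Char) (k : Nat), 1 ≤ k →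
    pvExpand none (pvRunsGo d (k + 1) cs) = [d, 'X'] ++ pvExpand none (pvRunsGo d k cs)
  | [], d, k, hk => by
      obtain ⟨j, rfl⟩ : ∃ j, k = j + 1 := ⟨k - 1, by omega⟩
      simp [pvRunsGo, pvExpand, List.replicate_succ]
  | e :: cs', d, k, hk => by
      by_cases h : e = d
      · subst h
        simp only [pvRunsGo]
        exact pvExpand_none_succ cs' e (k + 1) (by omega)
      · obtain ⟨j, rfl⟩ : ∃ j, k = j + 1 := ⟨k - 1, by omega⟩
        simp [pvRunsGo, h, pvExpand, List.replicate_succ]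

-- with a carried letter, it pairs with the run's first letter
lemma pvExpand_some_succ : ∀ (cs : List Char) (q d : Char) (k : Nat), 1 ≤ k →
    pvExpand (some q) (pvRunsGo d (k + 1) cs) = [q, d] ++ pvExpand none (pvRunsGo d k cs)
  | [], q, d, k, hk => by
      obtain ⟨j, rfl⟩ : ∃ j, k = j + 1 := ⟨k - 1, by omega⟩
      simp [pvRunsGo, pvExpand]
  | e :: cs', q, d, k, hk => by
      by_cases h : e = d
      · subst h
        simp only [pvRunsGo]
        exact pvExpand_some_succ cs' q e (k + 1) (by omega)
      · obtain ⟨j, rfl⟩ : ∃ j, k = j + 1 := ⟨k - 1, by omega⟩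
        simp [pvRunsGo, h, pvExpand]

-- A's loop body equals B's run expansion
lemma pvLoopA_eq_expand : ∀ (cs : List Char) (acc : List Char) (c : Char),
    pvLoopA acc (c :: cs) = acc ++ pvExpand none (pvRunsGo c 1 cs)
  | [], acc, c => by simp [pvLoopA, pvRunsGo, pvExpand]
  | d :: rest, acc, c => by
      by_cases h : c = d
      · subst h
        rw [show pvLoopA acc (c :: c :: rest) = pvLoopA (acc ++ [c, 'X']) (c :: rest) from by
              simp [pvLoopA],
            pvLoopA_eq_expand rest (acc ++ [c, 'X']) c,
            show pvRunsGo c 1 (c :: rest) = pvRunsGo c (1 + 1) rest from by simp [pvRunsGo],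
            pvExpand_none_succ rest c 1 (by omega)]
        simp
      · rw [show pvLoopA acc (c :: d :: rest) = pvLoopA (acc ++ [c, d]) rest from by
              simp [pvLoopA, h]]
        have h1 : pvRunsGo c 1 (d :: rest) = (c, 1) :: pvRunsGo d 1 rest := by
          simp only [pvRunsGo]
          rw [if_neg (fun hh : d = c => h hh.symm)]
        have hrhs : pvExpand none (pvRunsGo c 1 (d :: rest))
            = pvExpand (some c) (pvRunsGo d 1 rest) := by
          rw [h1]; simp [pvExpand]
        rw [hrhs]
        match rest with
        | [] => simp [pvLoopA, pvRunsGo, pvExpand]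
        | e :: rest' =>
          rw [pvLoopA_eq_expand rest' (acc ++ [c, d]) e]
          by_cases he : e = d
          · subst he
            rw [show pvRunsGo e 1 (e :: rest') = pvRunsGo e (1 + 1) rest' from by simp [pvRunsGo],
                pvExpand_some_succ rest' c e 1 (by omega)]
            simp
          · simp [pvRunsGo, he, pvExpand]

lemma pvCore_eq (cs : List Char) : pvLoopA [] cs = pvExpand none (pvRuns cs) := by
  match cs with
  | [] => simp [pvLoopA, pvRuns, pvExpand]
  | c :: rest => rw [pvRuns, pvLoopA_eq_expand rest [] c]; simp

-- ===== VERDICT (by name: the statement is the Claim_ definition above) =====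
theorem format_plaintext_spec : Claim_equal_format_plaintext := by
  intro plaintext _
  unfold Spec_format_plaintext format_plaintext format_plaintext_alt
  simp only [pvCore_eq]
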